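-- pv_equiv track=rewrite | github.com/yao-laboratory/RNAFoldAssess | pipelines/crystal_pipelines/crystal2_redo/preprocess_dataset.py | ss_chains_are_symmetric
-- ===== SOURCE A (Python) =====
-- def ss_chains_are_symmetric(ss):
--     chains = ss.split("&")
--     for chain in chains:
--         opens = chain.count("(")
--         closes = chain.count(")")
--         if opens != closes:
--             return False
--     return True
-- ===== SOURCE B (Python) =====
-- def ss_chains_are_symmetric(ss):
--     delta = 0
--     for c in ss:
--         if c == "&":
--             if delta != 0:
--                 return False
--             delta = 0
--         elif c == "(":
--             delta += 1
--         elif c == ")":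
--             delta -= 1
--     return delta == 0
-- ===== Notes on version B (the rewrite author's own statement) =====
-- stated objective: alternative
-- what changed: Replaced splitting on the ampersand separator followed by two .count scans per chain with a single streaming pass over the characters that keeps a running open-minus-close parenthesis delta, checking and resetting it at each separator.
import Mathlib
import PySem

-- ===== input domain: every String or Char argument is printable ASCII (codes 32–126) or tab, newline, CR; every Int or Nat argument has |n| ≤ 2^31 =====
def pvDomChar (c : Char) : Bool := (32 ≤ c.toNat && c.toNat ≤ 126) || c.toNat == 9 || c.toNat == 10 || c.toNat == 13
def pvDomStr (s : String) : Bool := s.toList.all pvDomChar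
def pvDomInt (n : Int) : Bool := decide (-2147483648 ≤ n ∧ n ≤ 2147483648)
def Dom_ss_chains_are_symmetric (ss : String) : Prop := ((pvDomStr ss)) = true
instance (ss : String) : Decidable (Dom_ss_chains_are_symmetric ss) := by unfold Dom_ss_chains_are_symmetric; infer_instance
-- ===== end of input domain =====

-- B replaces split-on-'&' plus per-chain .count scans with one streaming pass keeping a running paren delta (alternative decomposition, same O(n) cost).


-- ===== PORT A =====
-- 'for chain in chains: … if opens != closes: return False' as structural recursion over the chain list
def ssChainsLoop : List (List Char) → Bool
  | [] => true
  | chain :: rest =>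
      let opens := PySem.Chars.count chain ['(']
      let closes := PySem.Chars.count chain [')']
      if opens ≠ closes then false else ssChainsLoop rest

def ss_chains_are_symmetric (ss : String) : Bool :=
  ssChainsLoop (PySem.Chars.splitOn ss.toList ['&'])

-- ===== PORT B =====
-- 'for c in ss' with early return, carrying delta; tail returns delta == 0
def ssAltLoop : Int → List Char → Bool
  | d, [] => d == 0
  | d, c :: rest =>
      if c = '&' then (if d ≠ 0 then false else ssAltLoop 0 rest)
      else if c = '(' then ssAltLoop (d + 1) rest
      else if c = ')' then ssAltLoop (d - 1) rest
      else ssAltLoop d rest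

def ss_chains_are_symmetric_alt (ss : String) : Bool :=
  ssAltLoop 0 ss.toList

-- ===== PRECONDITION & SPEC =====
def Spec_ss_chains_are_symmetric (ss : String) (out : Bool) : Prop := out = ss_chains_are_symmetric_alt ss
instance (ss : String) (out : Bool) : Decidable (Spec_ss_chains_are_symmetric ss out) := by unfold Spec_ss_chains_are_symmetric; infer_instance

-- ===== CLAIM (what is proved, stated in full; the proofs are below) =====
def Claim_equal_ss_chains_are_symmetric : Prop := ∀ (ss : String), Dom_ss_chains_are_symmetric ss → Spec_ss_chains_are_symmetric ss (ss_chains_are_symmetric ss)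

-- ===== LEMMAS AND PROOFS =====

-- reference splitting on a single character, structurally
def mySplit (c : Char) : List Char → List (List Char)
  | [] => [[]]
  | d :: rest =>
      match mySplit c rest with
      | [] => [[]]     -- unreachable
      | h :: t => if d = c then [] :: h :: t else (d :: h) :: t

theorem mySplit_ne_nil (c : Char) (l : List Char) : mySplit c l ≠ [] := by
  cases l with
  | nil => simp [mySplit]
  | cons d rest =>
      simp only [mySplit]
      rcases h : mySplit c rest with _ | ⟨h', t⟩ <;> split_ifs <;> simp

theorem mySplit_exists_cons (c : Char) (l : List Char) :
    ∃ h t, mySplit c l = h :: t := by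
  rcases hm : mySplit c l with _ | ⟨h, t⟩
  · exact absurd hm (mySplit_ne_nil c l)
  · exact ⟨h, t, rfl⟩

def glue (pre : List Char) : List (List Char) → List (List Char)
  | [] => [pre]
  | h :: t => (pre ++ h) :: t

theorem count_go_single (c : Char) (l : List Char) : ∀ (fuel acc : Nat),
    l.length ≤ fuel → PySem.Chars.count.go [c] fuel l acc = acc + l.count c := by
  induction l with
  | nil => intro fuel acc _; cases fuel <;> simp [PySem.Chars.count.go]
  | cons d rest ih =>
      intro fuel acc hf
      cases fuel with
      | zero => simp at hf
      | succ f =>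
          have hrest : rest.length ≤ f := by simpa using Nat.le_of_succ_le_succ hf
          by_cases hdc : c = d
          · subst hdc
            simp only [PySem.Chars.count.go, List.isPrefixOf, Bool.and_true,
              beq_self_eq_true, if_pos, List.length_cons, List.length_nil,
              Nat.zero_add, List.drop_succ_cons, List.drop_zero]
            rw [ih f (acc + 1) hrest]
            simp
            omega
          · simp only [PySem.Chars.count.go, List.isPrefixOf, Bool.and_true]
            rw [if_neg (by simpa using hdc : ¬((c == d) = true))]
            rw [ih f acc hrest]
            simp [Ne.symm hdc]

theorem chars_count_single (c : Char) (l : List Char) :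
    PySem.Chars.count l [c] = l.count c := by
  have h := count_go_single c l l.length 0 le_rfl
  simp only [PySem.Chars.count, List.isEmpty_cons, Bool.false_eq_true, if_false]
  omega

theorem splitOn_go_single (c : Char) (l : List Char) : ∀ (fuel : Nat) (cur : List Char) (acc : List (List Char)),
    l.length ≤ fuel →
    PySem.Chars.splitOn.go [c] fuel l cur acc = acc.reverse ++ glue cur.reverse (mySplit c l) := by
  induction l with
  | nil =>
      intro fuel cur acc _
      cases fuel <;> simp [PySem.Chars.splitOn.go, mySplit, glue]
  | cons d rest ih =>
      intro fuel cur acc hf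
      cases fuel with
      | zero => simp at hf
      | succ f =>
          have hrest : rest.length ≤ f := by simpa using Nat.le_of_succ_le_succ hf
          obtain ⟨h, t, hm⟩ := mySplit_exists_cons c rest
          by_cases hdc : c = d
          · subst hdc
            simp only [PySem.Chars.splitOn.go, List.isPrefixOf, Bool.and_true,
              beq_self_eq_true, if_pos, List.length_cons, List.length_nil,
              Nat.zero_add, List.drop_succ_cons, List.drop_zero]
            rw [ih f [] (cur.reverse :: acc) hrest]
            simp [mySplit, hm, glue]
          · simp only [PySem.Chars.splitOn.go, List.isPrefixOf, Bool.and_true]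
            rw [if_neg (by simpa using hdc : ¬((c == d) = true))]
            rw [ih f (d :: cur) acc hrest]
            simp [mySplit, hm, glue, Ne.symm hdc]

theorem chars_splitOn_single (c : Char) (l : List Char) :
    PySem.Chars.splitOn l [c] = mySplit c l := by
  rw [PySem.Chars.splitOn, splitOn_go_single c l (l.length + 1) [] [] (by omega)]
  obtain ⟨h, t, hm⟩ := mySplit_exists_cons c l
  simp [hm, glue]

-- B's running delta, read against the chain list of the remaining input
def chk (d : Int) : List (List Char) → Bool
  | [] => true     -- unreachable
  | h :: t => if d + (h.count '(' : Int) - (h.count ')' : Int) ≠ 0 then false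
              else ssChainsLoop t

theorem chk_zero (h : List Char) (t : List (List Char)) :
    chk 0 (h :: t) = ssChainsLoop (h :: t) := by
  simp only [chk, ssChainsLoop, chars_count_single]
  refine if_congr ?_ rfl rfl
  constructor <;> (intro hh; push_cast at *; omega)

theorem chk_cons (x : Char) (hx : x ≠ '&') (d : Int) (h : List Char) (t : List (List Char)) :
    chk d ((x :: h) :: t)
      = chk (d + (if x = '(' then 1 else 0) - (if x = ')' then 1 else 0)) (h :: t) := by
  simp only [chk, List.count_cons]
  refine if_congr ?_ rfl rfl
  by_cases hp : x = '('
  · subst hp; simp; constructor <;> (intro hh; push_cast at *; omega)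
  · by_cases hq : x = ')'
    · subst hq; simp; constructor <;> (intro hh; push_cast at *; omega)
    · simp [hp, hq]

theorem altLoop_eq_chk (l : List Char) : ∀ (d : Int),
    ssAltLoop d l = chk d (mySplit '&' l) := by
  induction l with
  | nil =>
      intro d
      by_cases hd : d = 0 <;> simp [ssAltLoop, mySplit, chk, ssChainsLoop, hd]
  | cons x rest ih =>
      intro d
      obtain ⟨h, t, hm⟩ := mySplit_exists_cons '&' rest
      by_cases hx : x = '&'
      · subst hx
        have hsplit : mySplit '&' ('&' :: rest) = [] :: h :: t := by simp [mySplit, hm]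
        rw [hsplit,
          show ssAltLoop d ('&' :: rest) = (if d ≠ 0 then false else ssAltLoop 0 rest) by
            simp [ssAltLoop]]
        by_cases hd : d = 0
        · subst hd
          rw [if_neg (by simp), ih 0, hm, chk_zero]
          show ssChainsLoop (h :: t) = chk 0 ([] :: h :: t)
          simp only [chk, List.count_nil, Nat.cast_zero]
          rw [if_neg (by norm_num)]
        · rw [if_pos hd]
          simp only [chk, List.count_nil, Nat.cast_zero]
          rw [if_pos (by omega)]
      · have hrw : mySplit '&' (x :: rest) = (x :: h) :: t := by
          simp [mySplit, hm, hx]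
        rw [hrw, chk_cons x hx d h t, ← hm, ← ih]
        by_cases hp : x = '('
        · subst hp; simp [ssAltLoop]
        · by_cases hq : x = ')'
          · subst hq; simp [ssAltLoop]
          · simp [ssAltLoop, hx, hp, hq]

-- ===== VERDICT (by name: the statement is the Claim_ definition above) =====
theorem ss_chains_are_symmetric_spec : Claim_equal_ss_chains_are_symmetric := by
  intro ss _
  unfold Spec_ss_chains_are_symmetric ss_chains_are_symmetric ss_chains_are_symmetric_alt
  rw [chars_splitOn_single, altLoop_eq_chk]
  obtain ⟨h, t, hm⟩ := mySplit_exists_cons '&' ss.toList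
  rw [hm, chk_zero]
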